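-- pv_equiv track=rewrite | github.com/HarshVir2003/ClashofBugs | processing.py | get_level_exp
-- ===== SOURCE A (Python) =====
-- def get_level_exp(player_xp):
--     level = 1
--     xp_required = 100  # Initial XP required for level 1
--     while level < 100:
--         if level % 10 == 0:
--             xp_required = 800  # For levels divisible by 10
--         if player_xp >= xp_required:
--             player_xp -= xp_required
--             level += 1
--             if level % 10 != 0:
--                 xp_required += 400  # Increase XP required by 400 until the next level divisible by 10
--         else:
--             break
--
--     if level < 100:
--         xp_to_next_level = xp_required - player_xp
--     else:
--         xp_to_next_level = 0
--
--     return level, xp_to_next_level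
-- ===== SOURCE B (Python) =====
-- def get_level_exp(player_xp):
--     # per-level XP requirement, closed form, for levels 1..99
--     reqs = [100 if L == 1
--             else 800 if L % 10 == 0
--             else (100 if L < 10 else 1200) + 400 * (L % 10 - 1)
--             for L in range(1, 100)]
--     cum = []
--     total = 0
--     for r in reqs:
--         total += r
--         cum.append(total)
--     level = 1 + sum(1 for c in cum if player_xp >= c)
--     if level == 100:
--         return 100, 0
--     return level, cum[level - 1] - player_xp
-- ===== Notes on version B (the rewrite author's own statement) =====
-- stated objective: alternative
-- what changed: Replaces A's stateful repeated-subtraction loop (mutating xp_required with conditional resets) by a closed-form per-level requirement table, cumulative thresholds, and a single count of thresholds <= player_xp to read off the level and leftover.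
import Mathlib
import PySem

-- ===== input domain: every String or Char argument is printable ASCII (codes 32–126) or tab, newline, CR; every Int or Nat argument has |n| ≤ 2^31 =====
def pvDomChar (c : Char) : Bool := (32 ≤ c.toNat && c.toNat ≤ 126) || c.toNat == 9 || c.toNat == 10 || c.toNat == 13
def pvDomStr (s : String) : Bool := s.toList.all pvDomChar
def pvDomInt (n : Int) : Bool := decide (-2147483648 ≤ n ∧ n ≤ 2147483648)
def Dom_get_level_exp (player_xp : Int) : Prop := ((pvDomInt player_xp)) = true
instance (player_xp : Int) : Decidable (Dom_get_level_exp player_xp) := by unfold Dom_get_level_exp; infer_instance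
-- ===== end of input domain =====

-- B replaces A's stateful repeated-subtraction loop by a closed-form requirement
-- table with cumulative thresholds and a single threshold count (objective: alternative).

-- ===== PORT A =====
-- the while loop, one constructor of fuel per iteration (level rises by 1 each
-- iteration, so fuel 99 from level 1 is exact); state = (level, xp_required, player_xp)
def loopA : Nat → Int → Int → Int → Int × Int × Int
  | 0, level, xp_required, player_xp => (level, xp_required, player_xp)
  | fuel + 1, level, xp_required, player_xp =>
    if level < 100 then
      let xp_required := if PySem.Int.mod level 10 = 0 then 800 else xp_required
      if player_xp ≥ xp_required then
        let player_xp := player_xp - xp_required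
        let level := level + 1
        let xp_required := if PySem.Int.mod level 10 ≠ 0 then xp_required + 400 else xp_required
        loopA fuel level xp_required player_xp
      else (level, xp_required, player_xp)
    else (level, xp_required, player_xp)

def get_level_exp (player_xp : Int) : Int × Int :=
  let r := loopA 99 1 100 player_xp
  (r.1, if r.1 < 100 then r.2.1 - r.2.2 else 0)

-- ===== PORT B =====
-- closed-form per-level requirement (Source B's comprehension body)
def reqB (L : Int) : Int :=
  if L = 1 then 100
  else if PySem.Int.mod L 10 = 0 then 800
  else (if L < 10 then 100 else 1200) + 400 * (PySem.Int.mod L 10 - 1)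

def get_level_exp_alt (player_xp : Int) : Int × Int :=
  let reqs := (PySem.List.pyRange 1 100 1).map reqB
  let cum := (reqs.foldl (fun (s : Int × List Int) r => (s.1 + r, s.2 ++ [s.1 + r])) (0, [])).2
  let level : Int := 1 + (cum.countP (fun c => decide (player_xp ≥ c)) : Nat)
  if level = 100 then (100, 0)
  else (level, (PySem.List.pyGet? cum (level - 1)).getD 0 - player_xp)

-- ===== PRECONDITION & SPEC =====
def Spec_get_level_exp (player_xp : Int) (out : Int × Int) : Prop := out = get_level_exp_alt player_xp
instance (player_xp : Int) (out : Int × Int) : Decidable (Spec_get_level_exp player_xp out) := by unfold Spec_get_level_exp; infer_instance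

-- ===== CLAIM (what is proved, stated in full; the proofs are below) =====
def Claim_equal_get_level_exp : Prop := ∀ (player_xp : Int), Dom_get_level_exp player_xp → Spec_get_level_exp player_xp (get_level_exp player_xp)

-- ===== LEMMAS AND PROOFS =====

-- cumulative sums of a requirement list starting from running total t
def cumFrom (t : Int) : List Int → List Int
  | [] => []
  | r :: rs => (t + r) :: cumFrom (t + r) rs

-- common reference shape: walk the remaining per-level requirements
def altLoop : List Int → Int → Int → Int × Int
  | [], l, _ => (l, 0)
  | r :: rs, l, p => if p ≥ r then altLoop rs (l + 1) (p - r) else (l, r - p)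

theorem foldl_cumFrom (rs : List Int) (t : Int) (acc : List Int) :
    (rs.foldl (fun (s : Int × List Int) r => (s.1 + r, s.2 ++ [s.1 + r])) (t, acc)).2
      = acc ++ cumFrom t rs := by
  induction rs generalizing t acc with
  | nil => simp [cumFrom]
  | cons r rs ih => simp [cumFrom, List.foldl_cons, ih]

theorem cumFrom_lt (rs : List Int) (t x : Int) (hpos : ∀ r ∈ rs, 0 < r)
    (hx : x ∈ cumFrom t rs) : t < x := by
  induction rs generalizing t with
  | nil => simp [cumFrom] at hx
  | cons r rs ih =>
    simp [cumFrom] at hx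
    rcases hx with hx | hx
    · have := hpos r (by simp); omega
    · have h1 := ih (t + r) (fun s hs => hpos s (by simp [hs])) hx
      have := hpos r (by simp); omega

theorem altLoop_count (rs : List Int) (l p t : Int) (hpos : ∀ r ∈ rs, 0 < r) :
    altLoop rs l p =
      (let cums := cumFrom t rs
       let c := cums.countP (fun x => decide (p + t ≥ x))
       if (c : Int) = rs.length then (l + c, 0)
       else (l + c, (PySem.List.pyGet? cums (c : Int)).getD 0 - (p + t))) := by
  induction rs generalizing l p t with
  | nil => simp [altLoop, cumFrom]
  | cons r rs ih =>
    have hpos' : ∀ s ∈ rs, 0 < s := fun s hs => hpos s (List.mem_cons_of_mem _ hs)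
    simp only [cumFrom, altLoop, List.length_cons]
    by_cases hp : p ≥ r
    · rw [if_pos hp]
      have hcount : List.countP (fun x => decide (p + t ≥ x)) ((t + r) :: cumFrom (t + r) rs)
          = List.countP (fun x => decide (p + t ≥ x)) (cumFrom (t + r) rs) + 1 := by
        simp [show p + t ≥ t + r from by omega]
      rw [hcount]
      have ih' := ih (l + 1) (p - r) (t + r) hpos'
      rw [show p - r + (t + r) = p + t from by ring] at ih'
      rw [ih']
      set c' := List.countP (fun x => decide (p + t ≥ x)) (cumFrom (t + r) rs) with hc'
      by_cases hlen : (c' : Int) = rs.length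
      · rw [if_pos hlen, if_pos (by push_cast; omega)]
        simp only [Prod.mk.injEq]
        refine ⟨by push_cast; omega, trivial⟩
      · rw [if_neg hlen, if_neg (by push_cast; omega)]
        simp only [Prod.mk.injEq]
        refine ⟨by push_cast; omega, ?_⟩
        rw [show ((c' + 1 : Nat) : Int) = ((c' : Nat) : Int) + 1 from by push_cast; ring,
          PySem.List.pyGet?_cons_succ]
    · rw [if_neg hp]
      have hzero : List.countP (fun x => decide (p + t ≥ x)) ((t + r) :: cumFrom (t + r) rs) = 0 := by
        apply List.countP_eq_zero.mpr
        intro x hx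
        simp only [List.mem_cons] at hx
        rcases hx with rfl | hx
        · simpa using (by omega : ¬ p + t ≥ t + r)
        · have := cumFrom_lt rs (t + r) x hpos' hx
          simpa using (by omega : ¬ p + t ≥ x)
      rw [hzero]
      rw [if_neg (by push_cast; omega)]
      simp only [Nat.cast_zero, PySem.List.pyGet?_zero, List.getElem?_cons_zero,
        Option.getD_some, Prod.mk.injEq]
      refine ⟨by omega, by ring⟩

theorem reqB_succ (l : Int) (h1 : 1 ≤ l) (h99 : l ≤ 99)
    (hmod : PySem.Int.mod (l + 1) 10 ≠ 0) :
    reqB l + 400 = reqB (l + 1) := by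
  simp only [reqB, PySem.Int.mod_eq_emod_of_pos (by norm_num : (0:Int) < 10)] at *
  split_ifs <;> omega

theorem loopA_altLoop (fuel : Nat) (l x p : Int) (h1 : 1 ≤ l) (h100 : l ≤ 100)
    (hfuel : (fuel : Int) = 100 - l)
    (hx : PySem.Int.mod l 10 ≠ 0 → x = reqB l) :
    (let r := loopA fuel l x p; (r.1, if r.1 < 100 then r.2.1 - r.2.2 else 0))
      = altLoop ((PySem.List.pyRange l 100 1).map reqB) l p := by
  induction fuel generalizing l x p with
  | zero =>
    have hl : l = 100 := by omega
    subst hl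
    simp [loopA, altLoop]
  | succ fuel ih =>
    have hl : l < 100 := by omega
    have hcons : PySem.List.pyRange l 100 1 = l :: PySem.List.pyRange (l + 1) 100 1 :=
      PySem.List.pyRange_one_cons (by omega)
    rw [hcons]
    simp only [List.map_cons, altLoop, loopA, if_pos hl]
    have hx1 : (if PySem.Int.mod l 10 = 0 then (800 : Int) else x) = reqB l := by
      by_cases hm : PySem.Int.mod l 10 = 0
      · have hne1 : l ≠ 1 := by
          intro h; rw [h] at hm
          rw [PySem.Int.mod_eq_emod_of_pos (by norm_num : (0:Int) < 10)] at hm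
          omega
        rw [if_pos hm]
        simp only [reqB]
        rw [if_neg hne1, if_pos hm]
      · rw [if_neg hm]; exact hx hm
    rw [hx1]
    by_cases hp : p ≥ reqB l
    · rw [if_pos hp, if_pos hp]
      refine ih (l + 1) _ (p - reqB l) (by omega) (by omega) (by push_cast at hfuel ⊢; omega)
        (fun hm => ?_)
      rw [if_pos hm]
      exact reqB_succ l h1 (by omega) hm
    · rw [if_neg hp, if_neg hp]
      simp [hl]

theorem reqs_pos : ∀ r ∈ (PySem.List.pyRange 1 100 1).map reqB, 0 < r := by decide

theorem get_level_exp_eq_altLoop (p : Int) :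
    get_level_exp p = altLoop ((PySem.List.pyRange 1 100 1).map reqB) 1 p := by
  have := loopA_altLoop 99 1 100 p (by norm_num) (by norm_num) (by norm_num)
    (fun _ => by decide)
  simpa [get_level_exp] using this

-- ===== VERDICT (by name: the statement is the Claim_ definition above) =====
theorem get_level_exp_spec : Claim_equal_get_level_exp := by
  intro p _
  unfold Spec_get_level_exp get_level_exp_alt
  rw [get_level_exp_eq_altLoop p,
    altLoop_count ((PySem.List.pyRange 1 100 1).map reqB) 1 p 0 reqs_pos]
  simp only [foldl_cumFrom, List.nil_append, add_zero]
  have hlen : (((PySem.List.pyRange 1 100 1).map reqB).length : Int) = 99 := by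
    simp [PySem.List.length_pyRange_one]
  rw [hlen]
  set c : Nat := (cumFrom 0 ((PySem.List.pyRange 1 100 1).map reqB)).countP
    (fun x => decide (p ≥ x)) with hc
  by_cases h99 : (c : Int) = 99
  · rw [if_pos h99, if_pos (by omega)]
    simp only [Prod.mk.injEq]
    exact ⟨by omega, trivial⟩
  · rw [if_neg h99, if_neg (by omega)]
    rw [show (1 : Int) + (c : Int) - 1 = (c : Int) from by omega]
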